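-- pv_equiv track=rewrite | github.com/hipotures/vocatio | scripts/pipeline/probe_vlm_photo_boundaries.py | _build_descriptor_field_registry_from_feature_columns
-- ===== SOURCE A (Python) =====
-- from typing import Any, Dict, List, Mapping, NamedTuple, Optional, Sequence
--
-- def _build_descriptor_field_registry_from_feature_columns(
--     feature_columns: Sequence[str],
-- ) -> dict[str, str]:
--     excluded_side_feature_names = {
--         "left_internal_gap_mean",
--         "right_internal_gap_mean",
--         "left_consistency_score",
--         "right_consistency_score",
--     }
--     registry: dict[str, str] = {}
--     for column_name in feature_columns:
--         if column_name in excluded_side_feature_names: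
--             continue
--         if column_name.startswith("left_"):
--             descriptor_name = column_name[len("left_") :]
--         elif column_name.startswith("right_"):
--             descriptor_name = column_name[len("right_") :]
--         else:
--             continue
--         suffix = descriptor_name.rsplit("_", 1)
--         if len(suffix) == 2 and len(suffix[1]) == 2 and suffix[1].isdigit():
--             registry[suffix[0]] = "multivalue"
--             continue
--         registry.setdefault(descriptor_name, "scalar")
--     return registry
-- ===== SOURCE B (Python) =====
-- def _build_descriptor_field_registry_from_feature_columns(feature_columns):
--     excluded_side_feature_names = {
--         "left_internal_gap_mean",
--         "right_internal_gap_mean",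
--         "left_consistency_score",
--         "right_consistency_score",
--     }
--
--     def classify(column_name):
--         if column_name in excluded_side_feature_names:
--             return None
--         if column_name.startswith("left_"):
--             descriptor_name = column_name[5:]
--         elif column_name.startswith("right_"):
--             descriptor_name = column_name[6:]
--         else:
--             return None
--         base, sep, suffix = descriptor_name.rpartition("_")
--         if sep and len(suffix) == 2 and suffix.isdigit():
--             return (base, True)
--         return (descriptor_name, False)
--
--     entries = [e for e in map(classify, feature_columns) if e is not None]
--     multivalue_bases = {name for name, is_multi in entries if is_multi}
--     registry = {}
--     for name, _ in entries:
--         if name not in registry: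
--             registry[name] = "multivalue" if name in multivalue_bases else "scalar"
--     return registry
-- ===== Notes on version B (the rewrite author's own statement) =====
-- stated objective: alternative
-- what changed: Replaces the single stateful fold (unconditional multivalue overwrite vs setdefault on one dict) by a two-pass decomposition: classify every column once into (name, is_multivalue) entries, collect the set of multivalue bases, then build the registry in first-occurrence order with each value decided up front from that set.
import Mathlib
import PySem

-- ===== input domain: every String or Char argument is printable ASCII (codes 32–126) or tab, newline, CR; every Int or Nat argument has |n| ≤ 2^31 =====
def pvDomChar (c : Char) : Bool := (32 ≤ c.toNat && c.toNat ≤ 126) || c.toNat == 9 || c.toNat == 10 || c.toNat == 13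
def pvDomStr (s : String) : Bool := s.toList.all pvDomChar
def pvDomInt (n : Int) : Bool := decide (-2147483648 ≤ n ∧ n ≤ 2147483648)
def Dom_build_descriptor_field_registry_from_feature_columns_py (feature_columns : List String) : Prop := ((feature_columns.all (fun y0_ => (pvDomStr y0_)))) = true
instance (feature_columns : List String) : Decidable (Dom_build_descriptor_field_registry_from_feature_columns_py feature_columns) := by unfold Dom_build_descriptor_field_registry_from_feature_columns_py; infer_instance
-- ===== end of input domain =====

-- B replaces A's single stateful fold (overwrite-vs-setdefault on one dict) by a two-pass
-- decomposition: classify columns into (name, is_multivalue) entries, collect the multivalue-base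
-- set, then build the registry deciding each value up front (objective: alternative, same cost).

-- ===== PORT A =====
def pvExcluded : List String :=
  ["left_internal_gap_mean", "right_internal_gap_mean",
   "left_consistency_score", "right_consistency_score"]

-- hand port of: suffix = descriptor_name.rsplit("_", 1); … (exact: rsplit splits at the
-- LAST '_', located with rfind; no '_' ⇒ the one-element list, so the multivalue test fails)
def pvRegisterA (registry : PySem.Dict String String) (descriptor_name : String) : PySem.Dict String String :=
  let i := PySem.Str.rfind descriptor_name "_"
  if i = -1 then registry.setdefault descriptor_name "scalar"
  else
    let suf := PySem.Str.slice descriptor_name (some (i + 1)) none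
    if PySem.Str.len suf = 2 && PySem.Str.strIsdigit suf then
      registry.insert (PySem.Str.slice descriptor_name none (some i)) "multivalue"
    else registry.setdefault descriptor_name "scalar"

def build_descriptor_field_registry_from_feature_columns_py (feature_columns : List String) : List (String × String) :=
  (feature_columns.foldl (fun (registry : PySem.Dict String String) column_name =>
    if pvExcluded.contains column_name then registry
    else if PySem.Str.startswith column_name "left_" then
      pvRegisterA registry (PySem.Str.slice column_name (some 5) none)
    else if PySem.Str.startswith column_name "right_" then
      pvRegisterA registry (PySem.Str.slice column_name (some 6) none)
    else registry) PySem.Dict.empty).items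

-- ===== PORT B =====
-- hand port of: base, sep, suffix = descriptor_name.rpartition("_") (exact: rpartition
-- splits at the LAST '_', located with rfind; empty sep ⇔ rfind = -1)
def pvClassifyDescriptor (descriptor_name : String) : Option (String × Bool) :=
  let i := PySem.Str.rfind descriptor_name "_"
  if i = -1 then some (descriptor_name, false)
  else
    let suf := PySem.Str.slice descriptor_name (some (i + 1)) none
    if PySem.Str.len suf = 2 && PySem.Str.strIsdigit suf then
      some (PySem.Str.slice descriptor_name none (some i), true)
    else some (descriptor_name, false)

def pvClassify (column_name : String) : Option (String × Bool) :=
  if pvExcluded.contains column_name then none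
  else if PySem.Str.startswith column_name "left_" then
    pvClassifyDescriptor (PySem.Str.slice column_name (some 5) none)
  else if PySem.Str.startswith column_name "right_" then
    pvClassifyDescriptor (PySem.Str.slice column_name (some 6) none)
  else none

def build_descriptor_field_registry_from_feature_columns_py_alt (feature_columns : List String) : List (String × String) :=
  let entries := feature_columns.filterMap pvClassify
  let multivalue_bases : PySem.Set String :=
    PySem.Set.ofList (entries.filterMap (fun e => if e.2 then some e.1 else none))
  (entries.foldl (fun (registry : PySem.Dict String String) e =>
    if registry.contains e.1 then registry
    else registry.insert e.1
      (if PySem.Set.contains multivalue_bases e.1 then "multivalue" else "scalar"))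
    PySem.Dict.empty).items

-- ===== PRECONDITION & SPEC =====
def Spec_build_descriptor_field_registry_from_feature_columns_py (feature_columns : List String) (out : List (String × String)) : Prop := out = build_descriptor_field_registry_from_feature_columns_py_alt feature_columns
instance (feature_columns : List String) (out : List (String × String)) : Decidable (Spec_build_descriptor_field_registry_from_feature_columns_py feature_columns out) := by unfold Spec_build_descriptor_field_registry_from_feature_columns_py; infer_instance

-- ===== CLAIM (what is proved, stated in full; the proofs are below) =====
def Claim_equal_build_descriptor_field_registry_from_feature_columns_py : Prop := ∀ (feature_columns : List String), Dom_build_descriptor_field_registry_from_feature_columns_py feature_columns → Spec_build_descriptor_field_registry_from_feature_columns_py feature_columns (build_descriptor_field_registry_from_feature_columns_py feature_columns)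

-- ===== LEMMAS AND PROOFS =====

-- A's per-column step, written through B's classifier
def pvStepA (registry : PySem.Dict String String) (e : String × Bool) : PySem.Dict String String :=
  if e.2 then registry.insert e.1 "multivalue" else registry.setdefault e.1 "scalar"

-- does the remainder still contain a multivalue entry for key k?
def pvTrueIn (rest : List (String × Bool)) (k : String) : Bool :=
  rest.any (fun e => e.1 == k && e.2)

def pvApplyE (registry : PySem.Dict String String) (e? : Option (String × Bool)) : PySem.Dict String String :=
  match e? with
  | none => registry
  | some e => pvStepA registry e

lemma pvRegisterA_eq (registry : PySem.Dict String String) (d : String) :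
    pvRegisterA registry d = pvApplyE registry (pvClassifyDescriptor d) := by
  simp only [pvRegisterA, pvClassifyDescriptor]
  generalize PySem.Str.rfind d "_" = i
  by_cases h : i = -1
  · simp [h, pvApplyE, pvStepA]
  · simp only [if_neg h]
    split_ifs with h2 <;> simp [pvApplyE, pvStepA]

lemma pvStepA_eq (registry : PySem.Dict String String) (column_name : String) :
    (if pvExcluded.contains column_name then registry
     else if PySem.Str.startswith column_name "left_" then
       pvRegisterA registry (PySem.Str.slice column_name (some 5) none)
     else if PySem.Str.startswith column_name "right_" then
       pvRegisterA registry (PySem.Str.slice column_name (some 6) none)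
     else registry)
    = pvApplyE registry (pvClassify column_name) := by
  unfold pvClassify
  split_ifs with h1 h2 h3
  · rfl
  · exact pvRegisterA_eq registry _
  · exact pvRegisterA_eq registry _
  · rfl

lemma pv_foldl_match (cols : List String) (d : PySem.Dict String String) :
    cols.foldl (fun (registry : PySem.Dict String String) column_name =>
      pvApplyE registry (pvClassify column_name)) d
    = (cols.filterMap pvClassify).foldl pvStepA d := by
  induction cols generalizing d with
  | nil => rfl
  | cons c t ih =>
    rw [List.foldl_cons, List.filterMap_cons]
    show List.foldl _ (pvApplyE d (pvClassify c)) t = _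
    cases h : pvClassify c with
    | none => exact ih d
    | some e =>
      show List.foldl _ (pvApplyE d (some e)) t = List.foldl pvStepA d (e :: List.filterMap pvClassify t)
      rw [List.foldl_cons]
      exact ih _

lemma pv_foldlA_eq (cols : List String) (d : PySem.Dict String String) :
    cols.foldl (fun (registry : PySem.Dict String String) column_name =>
      if pvExcluded.contains column_name then registry
      else if PySem.Str.startswith column_name "left_" then
        pvRegisterA registry (PySem.Str.slice column_name (some 5) none)
      else if PySem.Str.startswith column_name "right_" then
        pvRegisterA registry (PySem.Str.slice column_name (some 6) none)
      else registry) d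
    = (cols.filterMap pvClassify).foldl pvStepA d := by
  simp only [pvStepA_eq]
  exact pv_foldl_match cols d

-- the two-pass invariant: dB is dA with every key that still has a multivalue entry
-- in the remainder already promoted to "multivalue"
lemma pv_main (M : PySem.Set String) (rest : List (String × Bool))
    (dA dB : PySem.Dict String String)
    (hB : dB.items = dA.items.map (fun kv => (kv.1, if pvTrueIn rest kv.1 then "multivalue" else kv.2)))
    (hM1 : ∀ k, PySem.Set.contains M k = true → dA.contains k = true ∨ pvTrueIn rest k = true)
    (hM2 : ∀ k, pvTrueIn rest k = true → PySem.Set.contains M k = true) :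
    (rest.foldl pvStepA dA).items
    = (rest.foldl (fun (registry : PySem.Dict String String) e =>
        if registry.contains e.1 then registry
        else registry.insert e.1
          (if PySem.Set.contains M e.1 then "multivalue" else "scalar")) dB).items := by
  induction rest generalizing dA dB with
  | nil =>
    rw [List.foldl_nil, List.foldl_nil, hB]
    simp [pvTrueIn]
  | cons e t ih =>
    obtain ⟨k, b⟩ := e
    have hkeys : dB.keys = dA.keys := by
      simp only [PySem.Dict.keys, hB, List.map_map]
      rfl
    have hcont : dB.contains k = dA.contains k := by
      simp [PySem.Dict.contains_eq_decide_mem_keys, hkeys]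
    have hTrueCons : ∀ k', pvTrueIn ((k, b) :: t) k' = ((k' == k && b) || pvTrueIn t k') := by
      intro k'
      simp [pvTrueIn, List.any_cons]
      cases b <;> simp [BEq.comm]
    simp only [List.foldl_cons]
    cases hc : dA.contains k with
    | true =>
      have hcB : dB.contains k = true := by rw [hcont]; exact hc
      rw [if_pos hcB]
      cases b with
      | true =>
        rw [show pvStepA dA (k, true) = dA.insert k "multivalue" from rfl]
        apply ih
        · rw [PySem.Dict.items_insert_of_contains _ _ hc, hB, List.map_map]
          apply List.map_congr_left
          intro kv _
          by_cases hk : kv.1 = k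
          · simp [hk, hTrueCons]
          · simp [hTrueCons, hk]
        · intro k' hk'
          rcases hM1 k' hk' with h | h
          · left; simp [PySem.Dict.contains_insert, h]
          · rw [hTrueCons k'] at h
            rcases Bool.or_eq_true_iff.mp h with h | h
            · left
              have hkk : k' = k := by simpa using (Bool.and_eq_true_iff.mp h).1
              simp [hkk, PySem.Dict.contains_insert_self]
            · right; exact h
        · intro k' hk'
          exact hM2 k' (by rw [hTrueCons]; simp [hk'])
      | false =>
        rw [show pvStepA dA (k, false) = dA.setdefault k "scalar" from rfl,
          PySem.Dict.setdefault_of_contains _ _ hc]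
        apply ih
        · rw [hB]
          apply List.map_congr_left
          intro kv _
          by_cases hk : kv.1 = k <;> simp [hTrueCons, hk]
        · intro k' hk'
          rcases hM1 k' hk' with h | h
          · left; exact h
          · rw [hTrueCons k'] at h
            rcases Bool.or_eq_true_iff.mp h with h | h
            · simp at h
            · right; exact h
        · intro k' hk'
          exact hM2 k' (by rw [hTrueCons]; simp [hk'])
    | false =>
      have hcB : dB.contains k = false := by rw [hcont]; exact hc
      rw [if_neg (by simp [hcB])]
      have hnotmem : ∀ kv ∈ dA.items, kv.1 ≠ k := by
        intro kv hkv hkk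
        have : dA.contains k = true := by
          rw [PySem.Dict.contains_eq_decide_mem_keys]
          simp only [PySem.Dict.keys, decide_eq_true_eq]
          exact hkk ▸ List.mem_map_of_mem hkv
        rw [hc] at this
        exact Bool.false_ne_true this
      have hmapshift : dA.items.map (fun kv => (kv.1, if pvTrueIn ((k, b) :: t) kv.1 then "multivalue" else kv.2))
          = dA.items.map (fun kv => (kv.1, if pvTrueIn t kv.1 then "multivalue" else kv.2)) := by
        apply List.map_congr_left
        intro kv hkv
        have hne : (kv.1 == k) = false := by simp [hnotmem kv hkv]
        simp [hTrueCons, hne]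
      cases b with
      | true =>
        have hMk : PySem.Set.contains M k = true := hM2 k (by rw [hTrueCons]; simp)
        rw [show pvStepA dA (k, true) = dA.insert k "multivalue" from rfl, hMk]
        apply ih
        · rw [PySem.Dict.items_insert_of_not_contains _ _ hc,
            PySem.Dict.items_insert_of_not_contains _ _ hcB, hB, hmapshift, List.map_append]
          simp
        · intro k' hk'
          rcases hM1 k' hk' with h | h
          · left; simp [PySem.Dict.contains_insert, h]
          · rw [hTrueCons k'] at h
            rcases Bool.or_eq_true_iff.mp h with h | h
            · left
              have hkk : k' = k := by simpa using (Bool.and_eq_true_iff.mp h).1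
              simp [hkk, PySem.Dict.contains_insert_self]
            · right; exact h
        · intro k' hk'
          exact hM2 k' (by rw [hTrueCons]; simp [hk'])
      | false =>
        have hMk : PySem.Set.contains M k = pvTrueIn t k := by
          cases hT : pvTrueIn t k with
          | true => exact hM2 k (by rw [hTrueCons]; simp [hT])
          | false =>
            cases hMc : PySem.Set.contains M k with
            | false => rfl
            | true =>
              rcases hM1 k hMc with h | h
              · rw [hc] at h; exact absurd h Bool.false_ne_true
              · rw [hTrueCons k, hT] at h; simp at h
        rw [show pvStepA dA (k, false) = dA.setdefault k "scalar" from rfl,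
          PySem.Dict.setdefault_of_not_contains _ _ hc, hMk]
        apply ih
        · rw [PySem.Dict.items_insert_of_not_contains _ _ hc,
            PySem.Dict.items_insert_of_not_contains _ _ hcB, hB, hmapshift, List.map_append]
          simp
        · intro k' hk'
          rcases hM1 k' hk' with h | h
          · left; simp [PySem.Dict.contains_insert, h]
          · rw [hTrueCons k'] at h
            rcases Bool.or_eq_true_iff.mp h with h | h
            · left
              have hkk : k' = k := by simpa using (Bool.and_eq_true_iff.mp h).1
              simp [hkk, PySem.Dict.contains_insert_self]
            · right; exact h
        · intro k' hk'
          exact hM2 k' (by rw [hTrueCons]; simp [hk'])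

lemma pvTrueIn_iff_mem_bases (entries : List (String × Bool)) (k : String) :
    pvTrueIn entries k = true ↔ k ∈ entries.filterMap (fun e => if e.2 then some e.1 else none) := by
  simp only [pvTrueIn, List.any_eq_true, Bool.and_eq_true, beq_iff_eq, List.mem_filterMap]
  constructor
  · rintro ⟨e, he, h1, h2⟩; exact ⟨e, he, by simp [h2, h1]⟩
  · rintro ⟨e, he, h⟩
    by_cases h2 : e.2 = true
    · rw [if_pos h2] at h; exact ⟨e, he, by simpa using h, h2⟩
    · simp [h2] at h

-- ===== VERDICT (by name: the statement is the Claim_ definition above) =====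
theorem build_descriptor_field_registry_from_feature_columns_py_spec : Claim_equal_build_descriptor_field_registry_from_feature_columns_py := by
  intro feature_columns _
  unfold Spec_build_descriptor_field_registry_from_feature_columns_py
  unfold build_descriptor_field_registry_from_feature_columns_py
  unfold build_descriptor_field_registry_from_feature_columns_py_alt
  rw [pv_foldlA_eq]
  apply pv_main
  · simp [PySem.Dict.empty]
  · intro k hk
    right
    rw [pvTrueIn_iff_mem_bases]
    have := (PySem.Set.mem_ofList (xs := (feature_columns.filterMap pvClassify).filterMap (fun e => if e.2 then some e.1 else none)) (y := k))
    rw [← this]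
    simpa [PySem.Set.contains] using hk
  · intro k hk
    rw [pvTrueIn_iff_mem_bases] at hk
    have := (PySem.Set.mem_ofList (xs := (feature_columns.filterMap pvClassify).filterMap (fun e => if e.2 then some e.1 else none)) (y := k))
    simp only [PySem.Set.contains]
    rw [← this] at hk
    simpa using hk
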